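-- pv_equiv track=rewrite | github.com/faris-jpg/data_displayer9000 | assagainagain GUI.py | plot_gantt_chart
-- ===== SOURCE A (Python) =====
-- from math import floor
--
-- WINDOWWIDTH = 125
--
-- def remove_duplicates(timeline):
--     updated_timeline = []  # new list for new timeline
--     i = 0  #iterator
--
--     while i < len(timeline):
--         current_process = timeline[i]
--         end_time = current_process[2]
--
--         #checks next process if it is the same id
--         while i + 1 < len(timeline) and current_process[0] == timeline[i + 1][0]:
--             end_time = timeline[i + 1][2]  #update end time
--             i += 1
--
--         updated_timeline.append((current_process[0], current_process[1], end_time)) #appends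
--         i += 1
--
--     return(updated_timeline)
--
-- def plot_gantt_chart(timeline):
--     timeline = remove_duplicates(timeline)
--     windowSize = WINDOWWIDTH
--     timeEnd = timeline[-1][2]
--     timediv = floor(windowSize / timeEnd - 2) + 1 #finds the floor of each timedivision (how many char per second)
--
--     #gets the output for all the process names
--     nameOutput = ''
--     for task in timeline:
--         duration = task[2] - task[1]
--         nameOutput += task[0].ljust(timediv * duration, ' ') + '|'
--
--     #gets output for all the seconds
--     timeOutput = '|'
--     for task in timeline:
--         duration = task[2] - task[1]
--         timeOutput += str(task[1]).ljust( timediv * duration, ' ') + '|'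
--     timeOutput += str(timeEnd)
--
--     #outputs the table with borders
--     border = '+' + ''.join('-' for x in range(len(timeOutput) - 1)) + '+'
--
--     output = border + '\n'  + '|' + nameOutput + '\n' + timeOutput + '\n' + border
--     return output
-- ===== SOURCE B (Python) =====
-- WINDOWWIDTH = 125
--
-- def plot_gantt_chart(timeline):
--     # find run boundaries by comparing each entry with its neighbours instead of merging
--     ids = [t[0] for t in timeline]
--     starts = [(t[0], t[1]) for t, prev in zip(timeline, [None] + ids) if t[0] != prev]
--     ends = [t[2] for t, nxt in zip(timeline, ids[1:] + [None]) if t[0] != nxt]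
--     time_end = timeline[-1][2]
--     timediv = WINDOWWIDTH // time_end - 1
--     name_line = '|'
--     time_line = '|'
--     for (pid, start), end in zip(starts, ends):
--         width = timediv * (end - start)
--         name_line += pid.ljust(width) + '|'
--         time_line += str(start).ljust(width) + '|'
--     time_line += str(time_end)
--     border = '+' + '-' * (len(time_line) - 1) + '+'
--     return border + '\n' + name_line + '\n' + time_line + '\n' + border
-- ===== Notes on version B (the rewrite author's own statement) =====
-- stated objective: alternative
-- what changed: Instead of A's stateful index-lookahead merge pass, B detects run boundaries statelessly by zipping the timeline with its shifted id list ([None]+ids / ids[1:]+[None]) to collect run starts and run ends separately, pairs them with zip, renders both rows in one fused loop, and computes the width as the integer 125//timeEnd - 1 instead of the float floor(125/timeEnd - 2) + 1 (exact for |timeEnd| <= 2^31).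
import Mathlib
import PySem

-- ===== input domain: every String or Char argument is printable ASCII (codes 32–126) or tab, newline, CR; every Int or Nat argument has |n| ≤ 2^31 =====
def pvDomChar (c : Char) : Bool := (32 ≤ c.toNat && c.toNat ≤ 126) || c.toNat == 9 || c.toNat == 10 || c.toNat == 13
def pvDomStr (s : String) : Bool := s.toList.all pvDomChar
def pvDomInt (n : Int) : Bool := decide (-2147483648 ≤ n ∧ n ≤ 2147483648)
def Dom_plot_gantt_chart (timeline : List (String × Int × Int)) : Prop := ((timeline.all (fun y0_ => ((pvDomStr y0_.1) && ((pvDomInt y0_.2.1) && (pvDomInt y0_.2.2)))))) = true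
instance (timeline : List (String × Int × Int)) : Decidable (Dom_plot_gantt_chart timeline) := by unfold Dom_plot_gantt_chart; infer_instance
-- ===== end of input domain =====

-- B replaces A's stateful index-lookahead merge by stateless run-boundary detection: it pairs each
-- entry with its neighbours (zip with the shifted id list) to pick out run starts and run ends and
-- zips those, then renders both rows in one fused loop (objective: alternative; same cost).

-- shared primitive port: Python's s.ljust(w, ' ') on code points (exact: pads with spaces up to w, never truncates)
def ljustChars (s : List Char) (w : Int) : List Char :=
  s ++ List.replicate (w - s.length).toNat ' '

-- ===== PORT A =====
-- A's remove_duplicates: the outer while walks an index, the inner while swallows following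
-- entries with the same id, updating only the end time; transliterated as recursion on the list,
-- the inner-while step being the merge of the first two entries.
def removeDuplicates : List (String × Int × Int) → List (String × Int × Int)
  | [] => []
  | [c] => [(c.1, c.2.1, c.2.2)]
  | c :: d :: rest =>
    if c.1 == d.1 then removeDuplicates ((c.1, c.2.1, d.2.2) :: rest)
    else (c.1, c.2.1, c.2.2) :: removeDuplicates (d :: rest)
termination_by l => l.length

def plot_gantt_chart (timeline : List (String × Int × Int)) : String :=
  let tl := removeDuplicates timeline
  let windowSize : Int := 125
  let timeEnd : Int := (PySem.List.pyGetD tl (-1) ("", 0, 0)).2.2   -- timeline[-1][2]; IndexError (empty) excluded by Pre_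
  -- floor(windowSize / timeEnd - 2) + 1: Python float division; exact as the integer floor for
  -- 0 < |timeEnd| ≤ 2^31 (the float error of 125/timeEnd is far below its distance to the nearest
  -- integer unless 125/timeEnd is an exact small integer); timeEnd = 0 (ZeroDivisionError) excluded by Pre_
  let timediv : Int := PySem.Int.floordiv windowSize timeEnd - 2 + 1
  let nameOutput : List Char :=
    tl.foldl (fun s task => s ++ (ljustChars task.1.toList (timediv * (task.2.2 - task.2.1)) ++ ['|'])) []
  let timeOutput : List Char :=
    (tl.foldl (fun s task => s ++ (ljustChars (PySem.Int.toChars task.2.1) (timediv * (task.2.2 - task.2.1)) ++ ['|'])) ['|'])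
      ++ PySem.Int.toChars timeEnd
  let border : List Char :=
    ['+'] ++ PySem.Chars.join [] ((PySem.List.pyRange 0 ((timeOutput.length : Int) - 1) 1).map (fun _ => ['-'])) ++ ['+']
  String.ofList (border ++ ['\n'] ++ ['|'] ++ nameOutput ++ ['\n'] ++ timeOutput ++ ['\n'] ++ border)

-- ===== PORT B =====
-- B: no merging pass; run starts = entries whose id differs from their predecessor's, run ends =
-- entries whose id differs from their successor's, both found by zipping with the shifted id list
-- ([None]+ids / ids[1:]+[None]); the two rows are rendered in one loop over zip(starts, ends).
def plot_gantt_chart_alt (timeline : List (String × Int × Int)) : String :=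
  let ids := timeline.map (fun t => t.1)
  let starts := ((timeline.zip ((none : Option String) :: ids.map some)).filter
      (fun p => !(some p.1.1 == p.2))).map (fun p => (p.1.1, p.1.2.1))
  let ends := ((timeline.zip ((ids.drop 1).map some ++ [(none : Option String)])).filter
      (fun p => !(some p.1.1 == p.2))).map (fun p => p.1.2.2)
  let time_end : Int := (PySem.List.pyGetD timeline (-1) ("", 0, 0)).2.2   -- timeline[-1][2]
  let timediv : Int := PySem.Int.floordiv 125 time_end - 1
  -- one loop over zip(starts, ends) extending both rows
  let lines := (starts.zip ends).foldl
    (fun (st : List Char × List Char) pe =>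
      (st.1 ++ (ljustChars pe.1.1.toList (timediv * (pe.2 - pe.1.2)) ++ ['|']),
       st.2 ++ (ljustChars (PySem.Int.toChars pe.1.2) (timediv * (pe.2 - pe.1.2)) ++ ['|'])))
    (['|'], ['|'])
  let time_line : List Char := lines.2 ++ PySem.Int.toChars time_end
  let border : List Char := '+' :: (List.replicate (((time_line.length : Int) - 1)).toNat '-' ++ ['+'])  -- '-' * (len - 1)
  String.ofList (border ++ ['\n'] ++ lines.1 ++ ['\n'] ++ time_line ++ ['\n'] ++ border)

-- ===== PRECONDITION & SPEC =====
-- Pre_ excludes exactly where Python A raises: the empty timeline (IndexError on timeline[-1])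
-- and a last end time of 0 (ZeroDivisionError in windowSize / timeEnd).
def Pre_plot_gantt_chart (timeline : List (String × Int × Int)) : Prop :=
  timeline ≠ [] ∧ (timeline.getLastD ("", 0, 0)).2.2 ≠ 0
instance (timeline : List (String × Int × Int)) : Decidable (Pre_plot_gantt_chart timeline) := by
  unfold Pre_plot_gantt_chart; infer_instance

def pvWitness_plot_gantt_chart : (List (String × Int × Int)) :=
  [("A", 0, 2), ("A", 2, 3), ("B", 3, 5)]

def Spec_plot_gantt_chart (timeline : List (String × Int × Int)) (out : String) : Prop := out = plot_gantt_chart_alt timeline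
instance (timeline : List (String × Int × Int)) (out : String) : Decidable (Spec_plot_gantt_chart timeline out) := by unfold Spec_plot_gantt_chart; infer_instance

-- ===== CLAIM (what is proved, stated in full; the proofs are below) =====
def Claim_equal_plot_gantt_chart : Prop := ∀ (timeline : List (String × Int × Int)), Dom_plot_gantt_chart timeline → Pre_plot_gantt_chart timeline → Spec_plot_gantt_chart timeline (plot_gantt_chart timeline)

-- ===== LEMMAS AND PROOFS =====

-- recursive characterisations of B's two filtered zips
def runStarts : Option String → List (String × Int × Int) → List (String × Int)
  | _, [] => []
  | prev, t :: rest =>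
    if some t.1 == prev then runStarts (some t.1) rest
    else (t.1, t.2.1) :: runStarts (some t.1) rest

def runEnds : List (String × Int × Int) → List Int
  | [] => []
  | [t] => [t.2.2]
  | t :: u :: rest => if t.1 == u.1 then runEnds (u :: rest) else t.2.2 :: runEnds (u :: rest)
termination_by l => l.length

theorem starts_eq (l : List (String × Int × Int)) (prev : Option String) :
    ((l.zip (prev :: (l.map (fun t => t.1)).map some)).filter
      (fun p => !(some p.1.1 == p.2))).map (fun p => (p.1.1, p.1.2.1)) = runStarts prev l := by
  induction l generalizing prev with
  | nil => rfl
  | cons t rest ih =>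
    rw [runStarts]
    by_cases h : (some t.1 == prev) = true
    · simp only [List.map_cons, List.zip_cons_cons, List.filter_cons, h, Bool.not_true,
        Bool.false_eq_true, if_false, if_true]
      exact ih (some t.1)
    · simp only [List.map_cons, List.zip_cons_cons, List.filter_cons, eq_false_of_ne_true h,
        Bool.not_false, Bool.false_eq_true, if_false, if_true, List.map_cons]
      rw [ih (some t.1)]

theorem ends_eq (l : List (String × Int × Int)) :
    ((l.zip (((l.map (fun t => t.1)).drop 1).map some ++ [(none : Option String)])).filter
      (fun p => !(some p.1.1 == p.2))).map (fun p => p.1.2.2) = runEnds l := by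
  induction l with
  | nil => simp [runEnds]
  | cons t rest ih =>
    cases rest with
    | nil => simp [runEnds]
    | cons u rest' =>
      simp only [List.map_cons, List.drop_succ_cons, List.drop_zero, List.cons_append] at ih ⊢
      rw [runEnds]
      simp only [List.zip_cons_cons, List.filter_cons]
      by_cases h : (t.1 == u.1) = true
      · have hb : (!(some t.1 == some u.1)) = false := by simp [eq_of_beq h]
        simp only [hb, Bool.false_eq_true, if_false, h, if_true]
        exact ih
      · have hb : (!(some t.1 == some u.1)) = true := by
          simp only [Bool.not_eq_eq_eq_not, Bool.not_true, beq_eq_false_iff_ne, ne_eq,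
            Option.some.injEq]
          intro he; exact h (beq_iff_eq.mpr he)
        simp only [hb, if_true, eq_false_of_ne_true h, Bool.false_eq_true, if_false, List.map_cons]
        rw [ih]

-- zipping the run starts with the run ends reconstructs A's merged timeline
theorem zip_runs_eq (l : List (String × Int × Int)) :
    ((runStarts none l).zip (runEnds l)).map (fun p => (p.1.1, p.1.2, p.2)) = removeDuplicates l := by
  induction hn : l.length using Nat.strong_induction_on generalizing l with
  | _ n ih =>
  match l with
  | [] => simp [runStarts, runEnds, removeDuplicates]
  | [c] => simp [runStarts, runEnds, removeDuplicates]
  | c :: d :: rest =>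
    by_cases h : (c.1 == d.1) = true
    · have hcd : d.1 = c.1 := (eq_of_beq h).symm
      have h1 : runStarts none (c :: d :: rest) = runStarts none ((c.1, c.2.1, d.2.2) :: rest) := by
        simp [runStarts, hcd]
      have h2 : runEnds (c :: d :: rest) = runEnds ((c.1, c.2.1, d.2.2) :: rest) := by
        rw [runEnds]
        simp only [h, if_true]
        cases rest with
        | nil => simp [runEnds]
        | cons r rest'' =>
          rw [runEnds, runEnds]
          simp [hcd]
      rw [h1, h2, removeDuplicates]
      simp only [h, if_true]
      exact ih ((c.1, c.2.1, d.2.2) :: rest).length (by subst hn; simp) _ rfl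
    · have hdc : (some d.1 == some c.1) = false := by
        simp only [beq_eq_false_iff_ne, ne_eq, Option.some.injEq]
        intro he; exact h (by simp [he])
      have h1 : runStarts none (c :: d :: rest) = (c.1, c.2.1) :: runStarts none (d :: rest) := by
        simp [runStarts, hdc]
      have h2 : runEnds (c :: d :: rest) = c.2.2 :: runEnds (d :: rest) := by
        rw [runEnds]; simp [h]
      rw [h1, h2, removeDuplicates]
      simp only [h, Bool.false_eq_true, if_false]
      rw [List.zip_cons_cons, List.map_cons]
      congr 1
      exact ih (d :: rest).length (by subst hn; simp) _ rfl

-- merging never changes the last end time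
theorem rd_last (l : List (String × Int × Int)) (dflt : String × Int × Int) :
    ((removeDuplicates l).getLastD dflt).2.2 = (l.getLastD dflt).2.2 := by
  induction hn : l.length using Nat.strong_induction_on generalizing l dflt with
  | _ n ih =>
  match l with
  | [] => simp [removeDuplicates]
  | [c] => simp [removeDuplicates]
  | c :: d :: rest =>
    by_cases h : (c.1 == d.1) = true
    · rw [removeDuplicates]
      simp only [h, if_true]
      rw [ih ((c.1, c.2.1, d.2.2) :: rest).length (by subst hn; simp) _ dflt rfl]
      cases rest with
      | nil => rfl
      | cons r rest'' => rfl
    · rw [removeDuplicates]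
      simp only [h, Bool.false_eq_true, if_false]
      rw [List.getLastD_cons, List.getLastD_cons]
      exact ih (d :: rest).length (by subst hn; simp) _ _ rfl

theorem pyGetD_neg_one_getLastD (l : List (String × Int × Int)) (dflt : String × Int × Int) :
    PySem.List.pyGetD l (-1) dflt = l.getLastD dflt := by
  cases l with
  | nil => rfl
  | cons x xs =>
    rw [PySem.List.pyGetD_neg_one (h := by simp)]
    simp [List.getLastD_eq_getLast?, List.getLast?_eq_getLast_of_ne_nil]

-- a fold appending chunks equals the flattened list of chunks
theorem foldl_append_chunks {α β : Type} (f : α → List β) (l : List α) (init : List β) :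
    l.foldl (fun s x => s ++ f x) init = init ++ (l.map f).flatten := by
  induction l generalizing init with
  | nil => simp
  | cons x xs ih => simp [ih, List.append_assoc]

-- joining n singleton "-" strings is n dashes
theorem join_rep (n : Nat) : PySem.Chars.join [] (List.replicate n ['-']) = List.replicate n '-' := by
  induction n with
  | zero => rfl
  | succ k ih =>
    cases k with
    | zero => rfl
    | succ j =>
      show PySem.Chars.join [] (['-'] :: ['-'] :: List.replicate j ['-']) = '-' :: List.replicate (j+1) '-'
      rw [PySem.Chars.join_cons_cons]
      show '-' :: PySem.Chars.join [] (List.replicate (j+1) ['-']) = _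
      rw [ih]

theorem join_dashes (m : Int) :
    PySem.Chars.join [] ((PySem.List.pyRange 0 m 1).map (fun _ => ['-'])) =
      List.replicate m.toNat '-' := by
  have hlen : ((PySem.List.pyRange 0 m 1).map (fun _ => ['-'])) = List.replicate m.toNat ['-'] := by
    rw [List.map_const']
    simp [PySem.List.length_pyRange_one]
  rw [hlen, join_rep]

-- ===== VERDICT (by name: the statement is the Claim_ definition above) =====
theorem plot_gantt_chart_spec : Claim_equal_plot_gantt_chart := by
  intro timeline _ _
  simp only [Spec_plot_gantt_chart, plot_gantt_chart, plot_gantt_chart_alt]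
  rw [starts_eq timeline none, ends_eq timeline]
  rw [PySem.List.foldl_prod_mk
    (fun (s : List Char) (pe : (String × Int) × Int) => s ++ (ljustChars pe.1.1.toList
      ((PySem.Int.floordiv 125 (PySem.List.pyGetD timeline (-1) ("", 0, 0)).2.2 - 1) * (pe.2 - pe.1.2)) ++ ['|']))
    (fun (s : List Char) (pe : (String × Int) × Int) => s ++ (ljustChars (PySem.Int.toChars pe.1.2)
      ((PySem.Int.floordiv 125 (PySem.List.pyGetD timeline (-1) ("", 0, 0)).2.2 - 1) * (pe.2 - pe.1.2)) ++ ['|']))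
    ((runStarts none timeline).zip (runEnds timeline)) ['|'] ['|']]
  -- unify the two time-end expressions and the two timediv formulas
  rw [pyGetD_neg_one_getLastD timeline, pyGetD_neg_one_getLastD (removeDuplicates timeline), rd_last]
  have harith : PySem.Int.floordiv 125 (timeline.getLastD ("", 0, 0)).2.2 - 2 + 1
      = PySem.Int.floordiv 125 (timeline.getLastD ("", 0, 0)).2.2 - 1 := by ring
  rw [harith]
  -- rewrite B's fused loop over zip(starts, ends) as A's two loops over the merged timeline
  have hname : ((runStarts none timeline).zip (runEnds timeline)).map
      (fun pe => ljustChars pe.1.1.toList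
        ((PySem.Int.floordiv 125 (timeline.getLastD ("", 0, 0)).2.2 - 1) * (pe.2 - pe.1.2)) ++ ['|'])
      = (removeDuplicates timeline).map
      (fun task => ljustChars task.1.toList
        ((PySem.Int.floordiv 125 (timeline.getLastD ("", 0, 0)).2.2 - 1) * (task.2.2 - task.2.1)) ++ ['|']) := by
    rw [← zip_runs_eq timeline, List.map_map]; rfl
  have htime : ((runStarts none timeline).zip (runEnds timeline)).map
      (fun pe => ljustChars (PySem.Int.toChars pe.1.2)
        ((PySem.Int.floordiv 125 (timeline.getLastD ("", 0, 0)).2.2 - 1) * (pe.2 - pe.1.2)) ++ ['|'])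
      = (removeDuplicates timeline).map
      (fun task => ljustChars (PySem.Int.toChars task.2.1)
        ((PySem.Int.floordiv 125 (timeline.getLastD ("", 0, 0)).2.2 - 1) * (task.2.2 - task.2.1)) ++ ['|']) := by
    rw [← zip_runs_eq timeline, List.map_map]; rfl
  rw [foldl_append_chunks, foldl_append_chunks, foldl_append_chunks, foldl_append_chunks, hname, htime, join_dashes]
  simp [List.append_assoc]
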